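-- pv_equiv track=rewrite | github.com/DiamondKeySecurity/HSM | hsm_software/sw/console/scripts/remote_restore.py | isMasterKeyValid
-- ===== SOURCE A (Python) =====
-- def isMasterKeyValid(masterkey):
--     masterkey = masterkey.strip('\r\n')
--     count = 0
--     for c in masterkey:
--         if (c != ' '):
--             count = count + 1
--             if (c not in 'abcdef0123456789'):
--                 return False
--
--     return count == 64
-- ===== SOURCE B (Python) =====
-- def isMasterKeyValid(masterkey):
--     s = masterkey.strip('\r\n')
--     freq = {}
--     for c in s:
--         freq[c] = freq.get(c, 0) + 1
--     hexcount = sum(freq.get(c, 0) for c in 'abcdef0123456789')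
--     return hexcount == 64 and hexcount + freq.get(' ', 0) == len(s)
-- ===== Notes on version B (the rewrite author's own statement) =====
-- stated objective: alternative
-- what changed: Replaces A's per-character validate-and-count loop with early exit by a frequency-table algorithm: one counting pass builds a dict of character counts, then validity is decided arithmetically from the counts (sum of the 16 hex-digit counts equals 64, and that sum plus the space count accounts for the whole stripped string, so no other character occurs).
import Mathlib
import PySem

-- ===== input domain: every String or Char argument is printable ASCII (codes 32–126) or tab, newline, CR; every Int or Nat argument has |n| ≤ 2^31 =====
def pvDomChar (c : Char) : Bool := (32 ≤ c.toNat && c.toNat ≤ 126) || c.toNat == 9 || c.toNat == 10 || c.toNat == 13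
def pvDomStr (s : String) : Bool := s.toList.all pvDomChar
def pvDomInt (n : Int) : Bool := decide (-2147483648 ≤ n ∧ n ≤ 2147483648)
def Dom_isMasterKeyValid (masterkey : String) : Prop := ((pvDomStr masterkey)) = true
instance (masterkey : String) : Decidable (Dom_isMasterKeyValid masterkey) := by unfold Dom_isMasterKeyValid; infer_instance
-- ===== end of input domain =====

-- B replaces A's per-character validate-and-count loop by a frequency table: one counting pass
-- builds a dict, then validity is decided arithmetically from the stored counts (hex count = 64
-- and hex count + space count accounts for the whole string); alternative algorithm, same cost.

-- ===== PORT A =====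
-- the characters of 'abcdef0123456789' (single-char membership in that string = list membership)
def pvHexChars : List Char := "abcdef0123456789".toList

-- A's for-loop with its early 'return False' and the running count
def pvALoop : List Char → Nat → Bool
  | [], count => count == 64
  | c :: rest, count =>
    if c ≠ ' ' then
      if ¬ pvHexChars.contains c then false
      else pvALoop rest (count + 1)
    else pvALoop rest count

def isMasterKeyValid (masterkey : String) : Bool :=
  pvALoop (PySem.Str.stripChars masterkey "\r\n").toList 0

-- ===== PORT B =====
def isMasterKeyValid_alt (masterkey : String) : Bool :=
  let l := (PySem.Str.stripChars masterkey "\r\n").toList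
  -- for c in s: freq[c] = freq.get(c, 0) + 1
  let freq : PySem.Dict Char Int := l.foldl (fun d c => d.insert c (d.getD c 0 + 1)) PySem.Dict.empty
  -- hexcount = sum(freq.get(c, 0) for c in 'abcdef0123456789')
  let hexcount : Int := (pvHexChars.map (fun c => freq.getD c 0)).sum
  decide (hexcount = 64) && decide (hexcount + freq.getD ' ' 0 = (l.length : Int))

-- ===== PRECONDITION & SPEC =====
def Spec_isMasterKeyValid (masterkey : String) (out : Bool) : Prop := out = isMasterKeyValid_alt masterkey
instance (masterkey : String) (out : Bool) : Decidable (Spec_isMasterKeyValid masterkey out) := by unfold Spec_isMasterKeyValid; infer_instance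

-- ===== CLAIM (what is proved, stated in full; the proofs are below) =====
def Claim_equal_isMasterKeyValid : Prop := ∀ (masterkey : String), Dom_isMasterKeyValid masterkey → Spec_isMasterKeyValid masterkey (isMasterKeyValid masterkey)

-- ===== LEMMAS AND PROOFS =====
-- A's loop = (all non-space chars hex) && (count + number of non-space chars = 64)
theorem pvALoop_eq (l : List Char) (count : Nat) :
    pvALoop l count =
      ((l.filter (fun c => c ≠ ' ')).all (fun c => pvHexChars.contains c)
        && decide (count + (l.filter (fun c => c ≠ ' ')).length = 64)) := by
  induction l generalizing count with
  | nil =>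
    simp only [pvALoop, List.filter_nil, List.all_nil, Bool.true_and, List.length_nil, Nat.add_zero]
    by_cases h : count = 64 <;> simp [h]
  | cons c rest ih =>
    by_cases hc : c = ' '
    · simp [pvALoop, hc, ih]
    · by_cases hhex : pvHexChars.contains c
      · have hmem : c ∈ pvHexChars := by simpa using hhex
        simp only [pvALoop, if_pos (by simpa using hc), hhex]
        rw [ih]
        simp [hc, hmem, Nat.add_comm, Nat.add_assoc]
      · have hmem : c ∉ pvHexChars := by simpa using hhex
        simp [pvALoop, hc, hmem]

-- splitting one fresh character off a membership count
theorem pv_countP_cons_disjoint (l : List Char) (c : Char) (cs : List Char) (hc : c ∉ cs) :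
    l.countP (fun x => decide (x ∈ c :: cs)) = l.count c + l.countP (fun x => decide (x ∈ cs)) := by
  induction l with
  | nil => simp
  | cons a l ih =>
    rw [List.countP_cons, List.countP_cons, List.count_cons, ih]
    by_cases hac : a = c
    · subst hac; simp [hc]; omega
    · by_cases h : a ∈ cs <;> simp [hac, h] <;> omega

-- summing the per-character counts over a duplicate-free alphabet = one membership count
theorem pv_sum_counts (cs : List Char) (l : List Char) (hnd : cs.Nodup) :
    ((cs.map (fun c => (l.count c : Int))).sum) = ((l.countP (fun x => decide (x ∈ cs)) : Nat) : Int) := by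
  induction cs with
  | nil => simp
  | cons c cs ih =>
    have hc : c ∉ cs := (List.nodup_cons.mp hnd).1
    have hnd' : cs.Nodup := (List.nodup_cons.mp hnd).2
    rw [List.map_cons, List.sum_cons, ih hnd', pv_countP_cons_disjoint l c cs hc]
    push_cast
    ring


theorem pv_count_split (l : List Char) :
    l.countP (fun c => decide (c ∈ pvHexChars)) + l.count ' ' =
      l.countP (fun c => decide (c ∈ pvHexChars) || c == ' ') := by
  induction l with
  | nil => simp
  | cons a l ih =>
    rw [List.countP_cons, List.countP_cons, List.count_cons, ← ih]
    have hsp : ' ' ∉ pvHexChars := by decide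
    by_cases ha : a = ' '
    · subst ha; simp [hsp]; omega
    · by_cases hh : a ∈ pvHexChars <;> simp [ha, hh] <;> omega

theorem pv_contains_eq (c : Char) : pvHexChars.contains c = decide (c ∈ pvHexChars) := by
  simp

theorem pv_total (l : List Char) :
    l.countP (fun c => decide (c ≠ ' ')) + l.count ' ' = l.length := by
  have h := List.length_eq_countP_add_countP (l := l) (fun c => decide (c ≠ ' '))
  have hcs : l.countP (fun a => decide ¬(decide (a ≠ ' ') = true)) = l.count ' ' := by
    rw [List.count]; apply List.countP_congr; intro a _
    by_cases h : a = ' ' <;> simp [h]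
  omega

theorem pv_core (l : List Char) :
    ((l.filter (fun c => c ≠ ' ')).all (fun c => pvHexChars.contains c)
      && decide (0 + (l.filter (fun c => c ≠ ' ')).length = 64)) =
    (decide (((l.countP (fun x => decide (x ∈ pvHexChars)) : Nat) : Int) = 64)
      && decide (((l.countP (fun x => decide (x ∈ pvHexChars)) : Nat) : Int) + ((l.count ' ' : Nat) : Int) = (l.length : Int))) := by
  rw [Bool.eq_iff_iff]
  simp only [Bool.and_eq_true, List.all_eq_true, List.mem_filter, decide_eq_true_eq, Nat.zero_add,
    pv_contains_eq]
  have htot := pv_total l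
  constructor
  · rintro ⟨hall, hlen⟩
    have hfe : l.filter (fun c => c ≠ ' ') = l.filter (fun c => decide (c ∈ pvHexChars)) := by
      apply List.filter_congr
      intro a ha
      by_cases hsp : a = ' '
      · subst hsp; have : ' ' ∉ pvHexChars := by decide
        simp [this]
      · have hmem := hall a ⟨ha, hsp⟩
        simp [hsp, hmem]
    have h64 : l.countP (fun x => decide (x ∈ pvHexChars)) = 64 := by
      rw [List.countP_eq_length_filter, ← hfe, hlen]
    have hns : l.countP (fun c => decide (c ≠ ' ')) = 64 := by
      rw [List.countP_eq_length_filter, hlen]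
    refine ⟨by exact_mod_cast h64, ?_⟩
    have : l.countP (fun x => decide (x ∈ pvHexChars)) + l.count ' ' = l.length := by omega
    exact_mod_cast this
  · rintro ⟨h64, hsum⟩
    have h64' : l.countP (fun x => decide (x ∈ pvHexChars)) = 64 := by exact_mod_cast h64
    have hsum' : l.countP (fun x => decide (x ∈ pvHexChars)) + l.count ' ' = l.length := by
      exact_mod_cast hsum
    have hall' : ∀ a ∈ l, (decide (a ∈ pvHexChars) || a == ' ') = true := by
      rw [← List.countP_eq_length]
      rw [← pv_count_split, hsum']
    have hall : ∀ c ∈ l, c ≠ ' ' → decide (c ∈ pvHexChars) = true := by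
      intro c hc hne
      have := hall' c hc
      simpa [hne] using this
    constructor
    · intro c hc
      simpa using hall c hc.1 hc.2
    · have hfe : l.filter (fun c => c ≠ ' ') = l.filter (fun c => decide (c ∈ pvHexChars)) := by
        apply List.filter_congr
        intro a ha
        by_cases hsp : a = ' '
        · subst hsp; have : ' ' ∉ pvHexChars := by decide
          simp [this]
        · have := hall a ha hsp
          simp [hsp, this]
      rw [hfe, ← List.countP_eq_length_filter, h64']

-- ===== VERDICT (by name: the statement is the Claim_ definition above) =====
theorem isMasterKeyValid_spec : Claim_equal_isMasterKeyValid := by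
  intro masterkey _
  unfold Spec_isMasterKeyValid isMasterKeyValid isMasterKeyValid_alt
  set l := (PySem.Str.stripChars masterkey "\r\n").toList with hl
  have hget : ∀ c : Char,
      (l.foldl (fun d c => d.insert c (d.getD c 0 + 1)) PySem.Dict.empty).getD c 0 = (l.count c : Int) := by
    intro c
    rw [PySem.Dict.getD_foldl_insert_add_one, PySem.Dict.getD_empty]
    ring
  simp only [hget]
  rw [pvALoop_eq]
  have hnd : pvHexChars.Nodup := by decide
  rw [pv_sum_counts pvHexChars l hnd]
  exact pv_core l
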